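-- pv_equiv track=rewrite | github.com/metraton/gaia-ops | hooks/modules/tools/task_validator.py | _extract_command_candidates
-- ===== SOURCE A (Python) =====
-- from typing import Dict, Any, List, Optional, Tuple
--
-- def _extract_command_candidates(text: str) -> List[str]:
--     """Extract command-like lines from free-form text for verb detection.
--
--     Looks for lines that start with known CLI prefixes or contain command-like
--     patterns (e.g., "git push", "terraform apply").
--
--     Args:
--         text: Free-form text (prompt or description).
--
--     Returns:
--         List of candidate command strings to scan.
--     """
--     if not text:
--         return []
--
--     candidates: List[str] = []
--     # Known CLI prefixes that signal a command
--     cli_prefixes = (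
--         "git ", "kubectl ", "helm ", "flux ", "terraform ", "terragrunt ",
--         "gcloud ", "gsutil ", "aws ", "az ", "docker ", "podman ",
--         "npm ", "pnpm ", "yarn ", "pip ", "pip3 ",
--         "rm ", "mv ", "cp ", "dd ", "mkfs ",
--         "systemctl ", "service ",
--     )
--
--     text_lower = text.lower()
--
--     # Strategy 1: Scan the full text for known CLI command patterns
--     for prefix in cli_prefixes:
--         idx = 0
--         while True:
--             pos = text_lower.find(prefix, idx)
--             if pos == -1:
--                 break
--             # Only match at word boundaries (start of string or preceded by whitespace/punctuation)
--             if pos > 0 and text_lower[pos - 1].isalnum():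
--                 idx = pos + len(prefix)
--                 continue
--             # Extract from the prefix to end of line (or next sentence boundary)
--             end = text.find("\n", pos)
--             if end == -1:
--                 end = len(text)
--             fragment = text[pos:end].strip()
--             # Trim trailing punctuation/quotes that are part of prose
--             fragment = fragment.rstrip(".,;:!?\"')")
--             if fragment:
--                 candidates.append(fragment)
--             idx = pos + len(prefix)
--
--     return candidates
-- ===== SOURCE B (Python) =====
-- from typing import List
--
-- def _extract_command_candidates(text: str) -> List[str]:
--     """Single left-to-right scan: at each word boundary test every prefix,
--     collect fragments into per-prefix buckets, then concatenate the buckets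
--     in prefix order (same grouped output as the per-prefix find() loops)."""
--     cli_prefixes = (
--         "git ", "kubectl ", "helm ", "flux ", "terraform ", "terragrunt ",
--         "gcloud ", "gsutil ", "aws ", "az ", "docker ", "podman ",
--         "npm ", "pnpm ", "yarn ", "pip ", "pip3 ",
--         "rm ", "mv ", "cp ", "dd ", "mkfs ",
--         "systemctl ", "service ",
--     )
--     text_lower = text.lower()
--     n = len(text)
--     buckets: List[List[str]] = [[] for _ in cli_prefixes]
--     for i in range(n):
--         if i > 0 and text_lower[i - 1].isalnum():
--             continue  # not a word boundary
--         for k, prefix in enumerate(cli_prefixes):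
--             if text_lower.startswith(prefix, i):
--                 end = text.find("\n", i)
--                 if end == -1:
--                     end = n
--                 fragment = text[i:end].strip().rstrip(".,;:!?\"')")
--                 if fragment:
--                     buckets[k].append(fragment)
--     result: List[str] = []
--     for bucket in buckets:
--         result.extend(bucket)
--     return result
-- ===== Notes on version B (the rewrite author's own statement) =====
-- stated objective: alternative
-- what changed: Replaces the per-prefix repeated str.find/while loops with a single left-to-right scan that tests all prefixes at each word boundary and groups hits into per-prefix buckets concatenated afterwards.
import Mathlib
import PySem

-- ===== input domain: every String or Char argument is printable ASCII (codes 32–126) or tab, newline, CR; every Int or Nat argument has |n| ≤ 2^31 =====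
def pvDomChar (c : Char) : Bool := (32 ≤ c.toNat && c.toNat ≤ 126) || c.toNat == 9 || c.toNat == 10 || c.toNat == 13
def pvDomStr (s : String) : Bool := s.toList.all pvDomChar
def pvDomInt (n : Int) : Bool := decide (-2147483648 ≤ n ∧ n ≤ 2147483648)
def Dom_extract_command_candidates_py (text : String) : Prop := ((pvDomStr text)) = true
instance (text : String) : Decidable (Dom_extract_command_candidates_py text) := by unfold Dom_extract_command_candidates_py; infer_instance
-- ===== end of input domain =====

-- B is an alternative decomposition of the same extraction: one left-to-right scan over word
-- boundaries with per-prefix buckets, instead of A's per-prefix repeated str.find loops.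

-- shared port of the builtin str.rstrip(chars): remove trailing characters occurring in chars (exact)
def pvRstripChars (cs chars : List Char) : List Char :=
  (cs.reverse.dropWhile (fun c => chars.contains c)).reverse

-- the cli_prefixes tuple (identical literal in both Pythons)
def pvPrefixes : List (List Char) :=
  ["git ".toList, "kubectl ".toList, "helm ".toList, "flux ".toList, "terraform ".toList,
   "terragrunt ".toList, "gcloud ".toList, "gsutil ".toList, "aws ".toList, "az ".toList,
   "docker ".toList, "podman ".toList, "npm ".toList, "pnpm ".toList, "yarn ".toList,
   "pip ".toList, "pip3 ".toList, "rm ".toList, "mv ".toList, "cp ".toList, "dd ".toList,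
   "mkfs ".toList, "systemctl ".toList, "service ".toList]

def pvPunct : List Char := ".,;:!?\"')".toList

-- ===== PORT A =====
-- end = text.find("\n", pos); fragment = text[pos:end].strip().rstrip(".,;:!?\"')")
def pvFragA (tl : List Char) (pos : Nat) : String :=
  let e0 := PySem.Chars.findFrom tl ['\n'] (pos : Int) none
  let e := if e0 = -1 then (tl.length : Int) else e0
  String.ofList (pvRstripChars (PySem.Chars.strip (PySem.List.slice tl (some (pos : Int)) (some e))) pvPunct)

-- the inner `while True` loop of A for one prefix; fuel (low.length+1) only makes the
-- recursion structural — idx strictly increases each iteration, so it never runs out.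
-- text_lower[pos-1] is in range when 0 < pos (pos is a match position), so getD is exact.
def pvALoop (tl low p : List Char) (idx : Nat) (fuel : Nat) : List String :=
  match fuel with
  | 0 => []
  | fuel + 1 =>
    let pos := PySem.Chars.findFrom low p (idx : Int) none
    if pos = -1 then []
    else
      let pn := pos.toNat
      if decide (0 < pn) && PySem.Chars.isalnum (low.getD (pn - 1) ' ') then
        pvALoop tl low p (pn + p.length) fuel
      else
        let frag := pvFragA tl pn
        (if frag = "" then [] else [frag]) ++ pvALoop tl low p (pn + p.length) fuel

def extract_command_candidates_py (text : String) : List String :=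
  if text = "" then []
  else
    let tl := text.toList
    let low := PySem.Chars.lower tl
    pvPrefixes.foldl (fun cands p => cands ++ pvALoop tl low p 0 (low.length + 1)) []

-- ===== PORT B =====
def pvFragB (tl : List Char) (i : Nat) : String :=
  let e0 := PySem.Chars.findFrom tl ['\n'] (i : Int) none
  let e := if e0 = -1 then (tl.length : Int) else e0
  String.ofList (pvRstripChars (PySem.Chars.strip (PySem.List.slice tl (some (i : Int)) (some e))) pvPunct)

-- inner `for k, prefix in enumerate(cli_prefixes)` loop of B at one boundary i;
-- text_lower.startswith(prefix, i) with 0 ≤ i ≤ len is exactly a prefix test on drop i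
def pvBInner (tl low : List Char) (i : Nat) (bks : List (List String)) : List (List String) :=
  (PySem.List.enumerate pvPrefixes 0).foldl (fun bks kp =>
    if PySem.Chars.startswith (low.drop i) kp.2 then
      let frag := pvFragB tl i
      if frag = "" then bks else bks.modify kp.1.toNat (fun b => b ++ [frag])
    else bks) bks

def extract_command_candidates_py_alt (text : String) : List String :=
  let tl := text.toList
  let low := PySem.Chars.lower tl
  let n := tl.length
  let buckets := (PySem.List.pyRange 0 (n : Int) 1).foldl (fun bks i =>
    let iN := i.toNat   -- i ranges over range(n): nonnegative
    if decide (0 < iN) && PySem.Chars.isalnum (low.getD (iN - 1) ' ') then bks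
    else pvBInner tl low iN bks) (pvPrefixes.map (fun _ => []))
  buckets.foldl (fun r b => r ++ b) []

-- ===== PRECONDITION & SPEC =====
def Spec_extract_command_candidates_py (text : String) (out : List String) : Prop := out = extract_command_candidates_py_alt text
instance (text : String) (out : List String) : Decidable (Spec_extract_command_candidates_py text out) := by unfold Spec_extract_command_candidates_py; infer_instance

-- ===== CLAIM (what is proved, stated in full; the proofs are below) =====
def Claim_equal_extract_command_candidates_py : Prop := ∀ (text : String), Dom_extract_command_candidates_py text → Spec_extract_command_candidates_py text (extract_command_candidates_py text)

-- ===== LEMMAS AND PROOFS =====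

lemma pvFragB_eq : pvFragB = pvFragA := rfl

-- A position i is emitted iff it is at a word boundary and its stripped fragment is nonempty
def pvEmit (tl low : List Char) (i : Nat) : Option String :=
  if decide (0 < i) && PySem.Chars.isalnum (low.getD (i - 1) ' ') then none
  else (let f := pvFragA tl i; if f = "" then none else some f)

def pvHit (tl low : List Char) (i : Nat) (p : List Char) : Option String :=
  if PySem.Chars.startswith (low.drop i) p then
    (let f := pvFragB tl i; if f = "" then none else some f)
  else none

def pvEmitB (tl low : List Char) (i : Nat) (p : List Char) : Option String :=
  if decide (0 < i) && PySem.Chars.isalnum (low.getD (i - 1) ' ') then none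
  else pvHit tl low i p

lemma pvPrefixes_ok : ∀ p ∈ pvPrefixes,
    p ≠ [] ∧ p[p.length - 1]? = some ' ' ∧ p.dropLast.all (· ≠ ' ') := by decide

lemma pvPref_getElem? {low p : List Char} {i j : Nat}
    (h : p <+: low.drop i) (hj : j < p.length) : low[i + j]? = some (p[j]'hj) := by
  obtain ⟨t, ht⟩ := h
  rw [← List.getElem?_drop, ← ht, List.getElem?_append_left (by simpa using hj),
    List.getElem?_eq_getElem hj]

-- the prefixes end in a space and contain none elsewhere, so matches cannot overlap
lemma pvNoOverlap {low p : List Char} (hp : p ≠ []) (hlast : p[p.length - 1]? = some ' ')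
    (hmid : p.dropLast.all (· ≠ ' ')) {a b : Nat} (hab : a < b) (hb : b < a + p.length)
    (ha' : p <+: low.drop a) (hb' : p <+: low.drop b) : False := by
  have hL : 1 ≤ p.length := List.length_pos_of_ne_nil hp
  have hj1 : p.length - 1 < p.length := by omega
  have e1 := pvPref_getElem? ha' hj1
  have hlast' : p[p.length - 1]'hj1 = ' ' := by
    rw [List.getElem?_eq_getElem hj1] at hlast
    exact Option.some.inj hlast
  have hj2 : a + p.length - 1 - b < p.length := by omega
  have e2 := pvPref_getElem? hb' hj2
  rw [show b + (a + p.length - 1 - b) = a + (p.length - 1) by omega] at e2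
  rw [e1] at e2
  have e3 : p[a + p.length - 1 - b]'hj2 = ' ' := by
    rw [hlast'] at e2
    exact (Option.some.inj e2).symm
  have hjm : a + p.length - 1 - b < p.dropLast.length := by
    simp only [List.length_dropLast]; omega
  have := (List.all_eq_true.mp hmid) _ (List.getElem_mem hjm)
  rw [List.getElem_dropLast, e3] at this
  simp at this

-- characterization of A's while/find loop: it emits exactly the matching positions ≥ idx
lemma pvALoop_eq (tl low p : List Char) (hp : p ≠ []) (hlast : p[p.length - 1]? = some ' ')
    (hmid : p.dropLast.all (· ≠ ' '))
    (idx fuel : Nat) (hidx : idx ≤ low.length) (hfuel : low.length + 1 - idx ≤ fuel) :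
    pvALoop tl low p idx fuel =
      ((List.range' idx (low.length - idx)).filter
          (fun i => PySem.Chars.startswith (low.drop i) p)).filterMap (pvEmit tl low) := by
  induction fuel generalizing idx with
  | zero => omega
  | succ fuel ih =>
    by_cases hpos : PySem.Chars.findFrom low p (idx : Int) none = -1
    · have hinf := (PySem.Chars.findFrom_natCast_eq_neg_one_iff low p idx hidx).mp hpos
      have hfe : (List.range' idx (low.length - idx)).filter
          (fun i => PySem.Chars.startswith (low.drop i) p) = [] := by
        rw [List.filter_eq_nil_iff]
        intro a ha hsw
        rw [List.mem_range'_1] at ha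
        have hpref : p <+: (low.drop idx).drop (a - idx) := by
          rw [List.drop_drop, show idx + (a - idx) = a by omega]
          exact (PySem.Chars.startswith_iff _ _).mp hsw
        exact hinf ((PySem.Chars.isIn_iff_infix _ _).mp
          ((PySem.Chars.exists_prefix_drop_iff_isIn p (low.drop idx)).mp ⟨_, hpref⟩))
      simp only [pvALoop, hpos, if_pos, hfe, List.filterMap_nil]
    · obtain ⟨hge, hpref, hmin⟩ := PySem.Chars.findFrom_natCast_spec low p idx hidx hpos
      set F := PySem.Chars.findFrom low p (idx : Int) none with hF
      set pn := F.toNat with hpn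
      have hidxpn : idx ≤ pn := by omega
      have hL : 1 ≤ p.length := List.length_pos_of_ne_nil hp
      have hlen : p.length ≤ low.length - pn := by simpa using hpref.length_le
      have hpnlt : pn + p.length ≤ low.length := by
        have : pn < low.length := by omega
        omega
      -- split range at pn, then isolate pn, then skip the (no-overlap) window
      have hs1 : List.range' idx (low.length - idx)
          = List.range' idx (pn - idx) ++ List.range' pn (low.length - pn) := by
        have h := List.range'_append (s := idx) (m := pn - idx) (n := low.length - pn) (step := 1)
        rw [one_mul, show idx + (pn - idx) = pn by omega] at h
        rw [h, show (pn - idx) + (low.length - pn) = low.length - idx by omega]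
      have hs2 : List.range' pn (low.length - pn)
          = pn :: List.range' (pn + 1) (low.length - (pn + 1)) := by
        rw [show low.length - pn = (low.length - (pn + 1)) + 1 by omega, List.range'_succ]
      have hs3 : List.range' (pn + 1) (low.length - (pn + 1))
          = List.range' (pn + 1) (p.length - 1)
              ++ List.range' (pn + p.length) (low.length - (pn + p.length)) := by
        have h := List.range'_append (s := pn + 1) (m := p.length - 1)
          (n := low.length - (pn + p.length)) (step := 1)
        rw [one_mul, show pn + 1 + (p.length - 1) = pn + p.length by omega] at h
        rw [h, show (p.length - 1) + (low.length - (pn + p.length)) = low.length - (pn + 1) by omega]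
      have hf1 : (List.range' idx (pn - idx)).filter
          (fun i => PySem.Chars.startswith (low.drop i) p) = [] := by
        rw [List.filter_eq_nil_iff]
        intro a ha hsw
        rw [List.mem_range'_1] at ha
        exact hmin a ha.1 (by omega) ((PySem.Chars.startswith_iff _ _).mp hsw)
      have hf3 : (List.range' (pn + 1) (p.length - 1)).filter
          (fun i => PySem.Chars.startswith (low.drop i) p) = [] := by
        rw [List.filter_eq_nil_iff]
        intro a ha hsw
        rw [List.mem_range'_1] at ha
        exact pvNoOverlap hp hlast hmid (a := pn) (b := a) (by omega) (by omega) hpref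
          ((PySem.Chars.startswith_iff _ _).mp hsw)
      have hswpn : PySem.Chars.startswith (low.drop pn) p = true :=
        (PySem.Chars.startswith_iff _ _).mpr hpref
      have hrec := ih (pn + p.length) hpnlt (by omega)
      rw [hs1, hs2, hs3, List.filter_append, hf1, List.nil_append, List.filter_cons,
        List.filter_append, hf3, List.nil_append]
      simp only [hswpn, if_pos]
      rw [List.filterMap_cons]
      simp only [pvALoop, ← hF, if_neg hpos, ← hpn]
      by_cases hbd : (decide (0 < pn) && PySem.Chars.isalnum (low.getD (pn - 1) ' ')) = true
      · have hemit : pvEmit tl low pn = none := by unfold pvEmit; rw [if_pos hbd]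
        rw [if_pos hbd, hemit]
        exact hrec
      · have hemit : pvEmit tl low pn
            = (if pvFragA tl pn = "" then none else some (pvFragA tl pn)) := by
          unfold pvEmit; rw [if_neg hbd]
        rw [if_neg hbd, hemit]
        by_cases hfr : pvFragA tl pn = ""
        · rw [if_pos hfr, hrec]
          simp [hfr]
        · rw [if_neg hfr, hrec]
          simp [hfr]

lemma pvFilter_filterMap {α β : Type} (l : List α) (q : α → Bool) (f : α → Option β) :
    (l.filter q).filterMap f = l.filterMap (fun a => if q a then f a else none) := by
  induction l with
  | nil => rfl
  | cons a l ih =>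
    by_cases h : q a = true <;> simp [h, List.filterMap_cons, ih]

lemma pvEmit_eq (tl low : List Char) (p : List Char) (i : Nat) :
    (if PySem.Chars.startswith (low.drop i) p then pvEmit tl low i else none)
      = pvEmitB tl low i p := by
  unfold pvEmit pvEmitB pvHit
  by_cases h1 : PySem.Chars.startswith (low.drop i) p = true <;>
    by_cases h2 : (decide (0 < i) && PySem.Chars.isalnum (low.getD (i - 1) ' ')) = true <;>
      simp [h1, pvFragB_eq]

lemma pvModify_append_cons {α : Type} (bpre : List α) (b : α) (bsuf : List α) (f : α → α) :
    (bpre ++ b :: bsuf).modify bpre.length f = bpre ++ f b :: bsuf := by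
  induction bpre with
  | nil => simp [List.modify]
  | cons a l ih => simpa [List.modify] using ih

lemma pvBInner_aux (tl low : List Char) (i : Nat) :
    ∀ (l : List (List Char)) (bpre brest : List (List String)), l.length ≤ brest.length →
    ((PySem.List.enumerate l (bpre.length : Int)).foldl (fun bks kp =>
        if PySem.Chars.startswith (low.drop i) kp.2 then
          let frag := pvFragB tl i
          if frag = "" then bks else bks.modify kp.1.toNat (fun b => b ++ [frag])
        else bks) (bpre ++ brest))
    = bpre ++ (List.zipWith (fun p b => b ++ (pvHit tl low i p).toList) l (brest.take l.length))
        ++ brest.drop l.length := by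
  intro l
  induction l with
  | nil => intro bpre brest h; simp [PySem.List.enumerate]
  | cons p l ih =>
    intro bpre brest h
    cases brest with
    | nil => simp at h
    | cons b brest' =>
      have henum : PySem.List.enumerate (p :: l) (bpre.length : Int)
          = ((bpre.length : Int), p) :: PySem.List.enumerate l ((bpre.length : Int) + 1) := rfl
      rw [henum, List.foldl_cons]
      have hstep : (if PySem.Chars.startswith (low.drop i) p then
            let frag := pvFragB tl i
            if frag = "" then bpre ++ b :: brest'
            else (bpre ++ b :: brest').modify (bpre.length : Int).toNat (fun x => x ++ [frag])
          else bpre ++ b :: brest')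
          = (bpre ++ [b ++ (pvHit tl low i p).toList]) ++ brest' := by
        by_cases hsw : PySem.Chars.startswith (low.drop i) p = true
        · by_cases hfr : pvFragB tl i = ""
          · simp [hsw, hfr, pvHit]
          · simp only [hsw, if_pos, hfr, Int.toNat_natCast, pvHit]
            rw [pvModify_append_cons]
            simp
        · simp [hsw, pvHit]
      rw [hstep]
      have harg : ((bpre.length : Int) + 1) = (((bpre ++ [b ++ (pvHit tl low i p).toList]).length : Int)) := by
        simp
      rw [harg, ih (bpre ++ [b ++ (pvHit tl low i p).toList]) brest' (by simpa using Nat.le_of_succ_le_succ (by simpa using h))]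
      simp [List.append_assoc]

lemma pvZipWith_right_id {α β : Type} :
    ∀ (l : List α) (b : List β), l.length = b.length →
      List.zipWith (fun _ x => x) l b = b := by
  intro l
  induction l with
  | nil => intro b h; cases b <;> simp_all
  | cons a l ih =>
    intro b h
    cases b with
    | nil => simp_all
    | cons x b => simp_all

lemma pvZipWith_fuse {α β γ δ : Type} (f : α → γ → δ) (g : α → β → γ) :
    ∀ (l : List α) (b : List β),
      List.zipWith f l (List.zipWith g l b) = List.zipWith (fun p x => f p (g p x)) l b := by
  intro l
  induction l with
  | nil => intro b; simp
  | cons a l ih => intro b; cases b <;> simp_all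

lemma pvZipWith_const {α β γ : Type} (G : α → γ) :
    ∀ (l : List α) (l' : List β), l.length = l'.length →
      List.zipWith (fun p (_ : β) => G p) l l' = l.map G := by
  intro l
  induction l with
  | nil => intro l' h; simp
  | cons a l ih =>
    intro l' h
    cases l' with
    | nil => simp at h
    | cons x l' => simp_all

lemma pvFoldl_append_flatten {α : Type} :
    ∀ (L : List (List α)) (acc : List α),
      L.foldl (fun r b => r ++ b) acc = acc ++ L.flatten := by
  intro L
  induction L with
  | nil => intro acc; simp
  | cons b L ih => intro acc; simp [ih, List.append_assoc]

lemma pvStep_eq (tl low : List Char) (i : Nat) (bks : List (List String))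
    (h : bks.length = pvPrefixes.length) :
    (if decide (0 < i) && PySem.Chars.isalnum (low.getD (i - 1) ' ') then bks
     else pvBInner tl low i bks)
    = List.zipWith (fun p b => b ++ (pvEmitB tl low i p).toList) pvPrefixes bks := by
  by_cases hbd : (decide (0 < i) && PySem.Chars.isalnum (low.getD (i - 1) ' ')) = true
  · rw [if_pos hbd]
    have hfn : (fun (p : List Char) (b : List String) => b ++ (pvEmitB tl low i p).toList)
        = fun _ x => x := by
      funext p b
      unfold pvEmitB
      rw [if_pos hbd]
      simp
    rw [hfn, pvZipWith_right_id _ _ h.symm]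
  · rw [if_neg hbd]
    have haux := pvBInner_aux tl low i pvPrefixes [] bks (le_of_eq h.symm)
    have hb : pvBInner tl low i bks
        = List.zipWith (fun p b => b ++ (pvHit tl low i p).toList) pvPrefixes bks := by
      unfold pvBInner
      simpa [← h, List.take_length, List.drop_length] using haux
    rw [hb]
    congr 1
    funext p b
    unfold pvEmitB
    rw [if_neg hbd]

lemma pvOuter_eq (tl low : List Char) :
    ∀ (is : List Int) (bks : List (List String)), bks.length = pvPrefixes.length →
    is.foldl (fun bks i =>
        let iN := i.toNat
        if decide (0 < iN) && PySem.Chars.isalnum (low.getD (iN - 1) ' ') then bks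
        else pvBInner tl low iN bks) bks
    = List.zipWith (fun p b => b ++ is.filterMap (fun i => pvEmitB tl low i.toNat p)) pvPrefixes bks := by
  intro is
  induction is with
  | nil =>
    intro bks h
    simp only [List.foldl_nil, List.filterMap_nil]
    exact (by simpa using (pvZipWith_right_id pvPrefixes bks h.symm).symm)
  | cons i is ih =>
    intro bks h
    simp only [List.foldl_cons]
    rw [pvStep_eq tl low i.toNat bks h,
      ih _ (by simp [List.length_zipWith, h]), pvZipWith_fuse]
    congr 1
    funext p b
    rw [List.filterMap_cons]
    cases pvEmitB tl low i.toNat p <;> simp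

lemma pvAlt_char (text : String) :
    extract_command_candidates_py_alt text
      = pvPrefixes.flatMap (fun p =>
          (List.range text.toList.length).filterMap
            (fun i => pvEmitB text.toList (PySem.Chars.lower text.toList) i p)) := by
  simp only [extract_command_candidates_py_alt]
  rw [pvOuter_eq text.toList (PySem.Chars.lower text.toList)
    (PySem.List.pyRange 0 (text.toList.length : Int) 1)
    (List.map (fun _ => ([] : List String)) pvPrefixes) (by simp)]
  simp only [List.zipWith_map_right, List.nil_append]
  rw [pvZipWith_const (fun p => (PySem.List.pyRange 0 (text.toList.length : Int) 1).filterMap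
      (fun i => pvEmitB text.toList (PySem.Chars.lower text.toList) i.toNat p))
    pvPrefixes pvPrefixes rfl]
  rw [pvFoldl_append_flatten, List.nil_append, ← List.flatMap_def]
  simp only [PySem.List.pyRange_zero_natCast, List.filterMap_map, Function.comp,
    Int.toNat_natCast]

lemma pvA_char (text : String) :
    extract_command_candidates_py text
      = pvPrefixes.flatMap (fun p =>
          (List.range text.toList.length).filterMap
            (fun i => pvEmitB text.toList (PySem.Chars.lower text.toList) i p)) := by
  by_cases he : text = ""
  · subst he
    simp [extract_command_candidates_py]
  · unfold extract_command_candidates_py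
    rw [if_neg he, PySem.List.foldl_append_eq_flatMap, List.nil_append,
      List.flatMap_def, List.flatMap_def]
    congr 1
    apply List.map_congr_left
    intro p hpmem
    obtain ⟨hp, hlast, hmid⟩ := pvPrefixes_ok p hpmem
    have hlow : (PySem.Chars.lower text.toList).length = text.toList.length := by
      simp [PySem.Chars.lower]
    rw [pvALoop_eq text.toList (PySem.Chars.lower text.toList) p hp hlast hmid 0
      ((PySem.Chars.lower text.toList).length + 1) (Nat.zero_le _) (by omega)]
    simp only [Nat.sub_zero, ← List.range_eq_range']
    rw [pvFilter_filterMap, hlow]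
    congr 1
    funext i
    exact pvEmit_eq _ _ p i

-- ===== VERDICT (by name: the statement is the Claim_ definition above) =====
theorem extract_command_candidates_py_spec : Claim_equal_extract_command_candidates_py := by
  intro text _
  unfold Spec_extract_command_candidates_py
  rw [pvA_char, pvAlt_char]
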